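-- pv_equiv track=rewrite | github.com/emergeware/fossil-journey-tracker | download_gplates_cache.py | get_ages_for_model
-- ===== SOURCE A (Python) =====
-- def get_ages_for_model(max_age):
--     """Gera lista de idades para um modelo."""
--     ages = [0]
--     # Passo de 10 Ma ate 100, depois 20 Ma
--     for age in range(10, min(101, max_age + 1), 10):
--         ages.append(age)
--     for age in range(120, min(201, max_age + 1), 20):
--         ages.append(age)
--     for age in range(250, max_age + 1, 50):
--         ages.append(age)
--     return ages
-- ===== SOURCE B (Python) =====
-- def get_ages_for_model(max_age):
--     """Gera lista de idades para um modelo."""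
--     ages = [0]
--     current = 0
--     while True:
--         step = 10 if current < 100 else (20 if current < 200 else 50)
--         nxt = current + step
--         if nxt > max_age:
--             break
--         ages.append(nxt)
--         current = nxt
--     return ages
-- ===== Notes on version B (the rewrite author's own statement) =====
-- stated objective: simpler
-- what changed: Replaces the three fixed range() loops with one while loop that keeps a running current age and picks the next step (10/20/50) from thresholds on the current value.
import Mathlib
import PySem

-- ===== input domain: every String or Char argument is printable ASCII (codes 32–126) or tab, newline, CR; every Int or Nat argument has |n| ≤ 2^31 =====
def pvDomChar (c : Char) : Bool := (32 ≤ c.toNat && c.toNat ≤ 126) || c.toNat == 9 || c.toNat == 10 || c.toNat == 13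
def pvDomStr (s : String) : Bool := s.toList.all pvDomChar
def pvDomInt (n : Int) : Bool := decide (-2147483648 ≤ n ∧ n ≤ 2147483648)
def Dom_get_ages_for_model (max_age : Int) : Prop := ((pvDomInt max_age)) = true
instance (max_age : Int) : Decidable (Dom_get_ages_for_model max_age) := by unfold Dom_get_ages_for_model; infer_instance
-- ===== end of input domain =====

-- B replaces A's three fixed range() loops by one while loop with a running age and a
-- threshold-chosen step (objective: simpler); proved to return the same list for every Int input.

-- ===== PORT A =====
def get_ages_for_model (max_age : Int) : List Int :=
  let ages : List Int := [0]
  let ages := (PySem.List.pyRange 10 (min 101 (max_age + 1)) 10).foldl (fun acc age => acc ++ [age]) ages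
  let ages := (PySem.List.pyRange 120 (min 201 (max_age + 1)) 20).foldl (fun acc age => acc ++ [age]) ages
  let ages := (PySem.List.pyRange 250 (max_age + 1) 50).foldl (fun acc age => acc ++ [age]) ages
  ages

-- ===== PORT B =====
-- step = 10 if current < 100 else (20 if current < 200 else 50)
def stepOf (current : Int) : Int := if current < 100 then 10 else if current < 200 then 20 else 50

theorem stepOf_pos (current : Int) : 0 < stepOf current := by
  unfold stepOf; split_ifs <;> norm_num

-- the `while True: … break` loop of Source B
def altLoop (max_age current : Int) (ages : List Int) : List Int :=
  let nxt := current + stepOf current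
  if nxt > max_age then ages
  else altLoop max_age nxt (ages ++ [nxt])
termination_by (max_age - current).toNat
decreasing_by
  have := stepOf_pos current
  simp only [not_lt] at *
  omega

def get_ages_for_model_alt (max_age : Int) : List Int := altLoop max_age 0 [0]

-- ===== PRECONDITION & SPEC =====
def Spec_get_ages_for_model (max_age : Int) (out : List Int) : Prop := out = get_ages_for_model_alt max_age
instance (max_age : Int) (out : List Int) : Decidable (Spec_get_ages_for_model max_age out) := by unfold Spec_get_ages_for_model; infer_instance

-- ===== CLAIM (what is proved, stated in full; the proofs are below) =====
def Claim_equal_get_ages_for_model : Prop := ∀ (max_age : Int), Dom_get_ages_for_model max_age → Spec_get_ages_for_model max_age (get_ages_for_model max_age)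

-- ===== LEMMAS AND PROOFS =====

-- range(a,b,s) with positive step s and b ≤ a is empty
theorem pyRange_pos_nil (a b s : Int) (hs : 0 < s) (h : b ≤ a) :
    PySem.List.pyRange a b s = [] := by
  rw [PySem.List.pyRange_of_pos a b hs]
  simp [show ¬ a < b by omega]

-- range(a,b,s) with positive step and a < b starts with a
theorem pyRange_pos_cons (a b s : Int) (hs : 0 < s) (h : a < b) :
    PySem.List.pyRange a b s = a :: PySem.List.pyRange (a + s) b s := by
  rw [PySem.List.pyRange_of_pos a b hs, PySem.List.pyRange_of_pos (a + s) b hs]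
  have hdivnn : 0 ≤ (b - a - 1) / s := Int.ediv_nonneg (by omega) (le_of_lt hs)
  have hsplit : (b - a + s - 1) / s = (b - a - 1) / s + 1 := by
    rw [show b - a + s - 1 = b - a - 1 + 1 * s by ring, Int.add_mul_ediv_right _ _ (ne_of_gt hs)]
  have hcount : ((b - a + s - 1) / s).toNat
      = (if a + s < b then ((b - (a + s) + s - 1) / s).toNat else 0) + 1 := by
    by_cases h2 : a + s < b
    · have : b - (a + s) + s - 1 = b - a - 1 := by ring
      rw [if_pos h2, this, hsplit]; omega
    · have hz : (b - a - 1) / s = 0 := Int.ediv_eq_zero_of_lt (by omega) (by omega)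
      rw [if_neg h2, hsplit, hz]; decide
  rw [if_pos h, hcount, List.range_succ_eq_map, List.map_cons, List.map_map]
  congr 1
  · simp
  · congr 1; funext k; simp [Function.comp]; ring

-- foldl with append appends the whole list
theorem foldl_app (l : List Int) (init : List Int) :
    l.foldl (fun acc x => acc ++ [x]) init = init ++ l := by
  induction l generalizing init with
  | nil => simp
  | cons x xs ih => simp [List.foldl_cons, ih]

-- phase 3 of the loop (current ≥ 200, step 50) produces range(c+50, max+1, 50)
theorem loop3 (max : Int) : ∀ n : Nat, ∀ c : Int, 200 ≤ c → (max - c).toNat ≤ n → ∀ acc : List Int,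
    altLoop max c acc = acc ++ PySem.List.pyRange (c + 50) (max + 1) 50 := by
  intro n
  induction n with
  | zero =>
    intro c hc hn acc
    rw [altLoop]
    have hstep : stepOf c = 50 := by unfold stepOf; split_ifs <;> omega
    rw [hstep, if_pos (by omega), pyRange_pos_nil _ _ _ (by norm_num) (by omega)]
    simp
  | succ n ih =>
    intro c hc hn acc
    rw [altLoop]
    have hstep : stepOf c = 50 := by unfold stepOf; split_ifs <;> omega
    rw [hstep]
    by_cases hbr : c + 50 > max
    · rw [if_pos hbr, pyRange_pos_nil _ _ _ (by norm_num) (by omega)]; simp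
    · rw [if_neg hbr, ih (c + 50) (by omega) (by omega),
        pyRange_pos_cons (c + 50) (max + 1) 50 (by norm_num) (by omega)]
      simp [show c + 50 + 50 = c + 100 by ring]

-- phase 2 of the loop (100 ≤ current < 200 multiple of 20, step 20)
theorem loop2 (max : Int) : ∀ n : Nat, ∀ c : Int, 100 ≤ c → c < 200 → 20 ∣ c →
    (200 - c).toNat ≤ n → ∀ acc : List Int,
    altLoop max c acc = acc ++ (PySem.List.pyRange (c + 20) (min 201 (max + 1)) 20
      ++ PySem.List.pyRange 250 (max + 1) 50) := by
  intro n
  induction n with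
  | zero => intro c h1 h2 _ hn; omega
  | succ n ih =>
    intro c h1 h2 hd hn acc
    rw [altLoop]
    have hstep : stepOf c = 20 := by unfold stepOf; split_ifs <;> omega
    rw [hstep]
    by_cases hbr : c + 20 > max
    · rw [if_pos hbr, pyRange_pos_nil _ _ _ (by norm_num) (by omega),
        pyRange_pos_nil 250 _ _ (by norm_num) (by omega)]
      simp
    · rw [if_neg hbr]
      by_cases h200 : c + 20 = 200
      · have hc : c = 180 := by omega
        subst hc
        rw [h200, loop3 max (max - 200).toNat 200 (by norm_num) (by omega)]
        rw [pyRange_pos_cons 200 (min 201 (max + 1)) 20 (by norm_num) (by omega)]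
        simp only [show (200 : Int) + 20 = 220 from by norm_num,
          show (200 : Int) + 50 = 250 from by norm_num]
        rw [pyRange_pos_nil 220 (min 201 (max + 1)) 20 (by norm_num) (by omega)]
        simp
      · rw [ih (c + 20) (by omega) (by omega) (by omega) (by omega),
          pyRange_pos_cons (c + 20) (min 201 (max + 1)) 20 (by norm_num) (by omega)]
        simp [show c + 20 + 20 = c + 40 by ring]

-- phase 1 of the loop (0 ≤ current < 100 multiple of 10, step 10)
theorem loop1 (max : Int) : ∀ n : Nat, ∀ c : Int, 0 ≤ c → c < 100 → 10 ∣ c →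
    (100 - c).toNat ≤ n → ∀ acc : List Int,
    altLoop max c acc = acc ++ (PySem.List.pyRange (c + 10) (min 101 (max + 1)) 10
      ++ (PySem.List.pyRange 120 (min 201 (max + 1)) 20
      ++ PySem.List.pyRange 250 (max + 1) 50)) := by
  intro n
  induction n with
  | zero => intro c h1 h2 _ hn; omega
  | succ n ih =>
    intro c h0 h1 hd hn acc
    rw [altLoop]
    have hstep : stepOf c = 10 := by unfold stepOf; split_ifs <;> omega
    rw [hstep]
    by_cases hbr : c + 10 > max
    · rw [if_pos hbr, pyRange_pos_nil _ _ _ (by norm_num) (by omega),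
        pyRange_pos_nil 120 _ _ (by norm_num) (by omega),
        pyRange_pos_nil 250 _ _ (by norm_num) (by omega)]
      simp
    · rw [if_neg hbr]
      by_cases h100 : c + 10 = 100
      · have hc : c = 90 := by omega
        subst hc
        rw [h100, loop2 max 100 100 (by norm_num) (by norm_num) (by norm_num) (by omega)]
        rw [pyRange_pos_cons 100 (min 101 (max + 1)) 10 (by norm_num) (by omega)]
        simp only [show (100 : Int) + 10 = 110 from by norm_num,
          show (100 : Int) + 20 = 120 from by norm_num]
        rw [pyRange_pos_nil 110 (min 101 (max + 1)) 10 (by norm_num) (by omega)]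
        simp
      · rw [ih (c + 10) (by omega) (by omega) (by omega) (by omega),
          pyRange_pos_cons (c + 10) (min 101 (max + 1)) 10 (by norm_num) (by omega)]
        simp [show c + 10 + 10 = c + 20 by ring]

-- ===== VERDICT (by name: the statement is the Claim_ definition above) =====
theorem get_ages_for_model_spec : Claim_equal_get_ages_for_model := by
  intro max_age _
  unfold Spec_get_ages_for_model get_ages_for_model get_ages_for_model_alt
  rw [loop1 max_age 100 0 (by norm_num) (by norm_num) (by norm_num) (by norm_num)]
  simp only [foldl_app, List.append_assoc]
  norm_num
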